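-- pv_equiv track=rewrite | github.com/chpollin/FemPrompt_SozArb | assessment/zotero_to_excel.py | extract_source_tool
-- ===== SOURCE A (Python) =====
-- from typing import Dict, List, Optional
--
-- def extract_source_tool(collection_names: List[str]) -> str:
--     """Extract Deep Research tool from collection names"""
--     if not collection_names:
--         return 'Manual'
--
--     # Check collections for tool indicators
--     for coll in collection_names:
--         coll_lower = coll.lower()
--         if 'claude' in coll_lower:
--             return 'Claude'
--         elif 'gemini' in coll_lower:
--             return 'Gemini'
--         elif 'openai' in coll_lower or 'gpt' in coll_lower:
--             return 'ChatGPT'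
--         elif 'perplexity' in coll_lower:
--             return 'Perplexity'
--
--     return 'Manual'
-- ===== SOURCE B (Python) =====
-- _RULES = [(('claude',), 'Claude'), (('gemini',), 'Gemini'),
--           (('openai', 'gpt'), 'ChatGPT'), (('perplexity',), 'Perplexity')]
--
-- def extract_source_tool(collection_names):
--     """Staged scans: find each tool's first matching collection index,
--     then keep the tool with the smallest index (table order breaks ties)."""
--     lowered = [c.lower() for c in collection_names]
--     n = len(lowered)
--
--     def first_idx(keywords):
--         for i, c in enumerate(lowered):
--             if any(k in c for k in keywords):
--                 return i
--         return n
--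
--     best_idx, best_label = n, 'Manual'
--     for keywords, label in _RULES:
--         i = first_idx(keywords)
--         if i < best_idx:
--             best_idx, best_label = i, label
--     return best_label
-- ===== Notes on version B (the rewrite author's own statement) =====
-- stated objective: alternative
-- what changed: Instead of A's single pass over collections with a nested if/elif cascade, B runs one independent first-match scan per tool to get each tool's earliest matching index and then takes the argmin of those indices with table order breaking ties.
import Mathlib
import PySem

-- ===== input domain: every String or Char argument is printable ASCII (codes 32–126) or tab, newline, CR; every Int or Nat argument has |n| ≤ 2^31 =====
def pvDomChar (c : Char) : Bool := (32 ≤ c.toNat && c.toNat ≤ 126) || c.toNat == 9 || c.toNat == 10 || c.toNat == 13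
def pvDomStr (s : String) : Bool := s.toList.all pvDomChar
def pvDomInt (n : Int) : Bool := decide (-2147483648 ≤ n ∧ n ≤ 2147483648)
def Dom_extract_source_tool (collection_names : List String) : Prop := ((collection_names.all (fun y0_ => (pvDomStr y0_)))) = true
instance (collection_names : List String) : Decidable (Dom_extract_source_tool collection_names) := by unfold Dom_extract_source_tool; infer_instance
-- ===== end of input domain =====

-- B replaces A's single cascaded scan by one first-match index scan per tool plus an argmin over the four indices (table order breaks ties).
-- ===== PORT A =====
def extractLoopA : List String → String
  | [] => "Manual"
  | coll :: rest =>
    let coll_lower := PySem.Str.lower coll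
    if PySem.Str.isIn "claude" coll_lower then "Claude"
    else if PySem.Str.isIn "gemini" coll_lower then "Gemini"
    else if PySem.Str.isIn "openai" coll_lower || PySem.Str.isIn "gpt" coll_lower then "ChatGPT"
    else if PySem.Str.isIn "perplexity" coll_lower then "Perplexity"
    else extractLoopA rest

def extract_source_tool (collection_names : List String) : String :=
  if collection_names = [] then "Manual" else extractLoopA collection_names

-- ===== PORT B =====
def bRules : List (List String × String) :=
  [(["claude"], "Claude"), (["gemini"], "Gemini"),
   (["openai", "gpt"], "ChatGPT"), (["perplexity"], "Perplexity")]

-- index of the first element of `lowered` containing any keyword; length if none (Python's first_idx loop)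
def firstIdx (keywords : List String) : List String → Nat
  | [] => 0
  | c :: rest =>
    if keywords.any (fun k => PySem.Str.isIn k c) then 0 else firstIdx keywords rest + 1

def extract_source_tool_alt (collection_names : List String) : String :=
  let lowered := collection_names.map PySem.Str.lower
  let n := lowered.length
  (bRules.foldl (fun best e =>
      let i := firstIdx e.1 lowered
      if i < best.1 then (i, e.2) else best) (n, "Manual")).2

-- ===== PRECONDITION & SPEC =====
def Spec_extract_source_tool (collection_names : List String) (out : String) : Prop := out = extract_source_tool_alt collection_names
instance (collection_names : List String) (out : String) : Decidable (Spec_extract_source_tool collection_names out) := by unfold Spec_extract_source_tool; infer_instance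

-- ===== CLAIM (what is proved, stated in full; the proofs are below) =====
def Claim_equal_extract_source_tool : Prop := ∀ (collection_names : List String), Dom_extract_source_tool collection_names → Spec_extract_source_tool collection_names (extract_source_tool collection_names)

-- ===== LEMMAS AND PROOFS =====

-- result of the B fold as a function of the four indices and the length
def Gfun (i1 i2 i3 i4 n : Nat) : String :=
  (let b1 : Nat × String := if i1 < n then (i1, "Claude") else (n, "Manual")
   let b2 := if i2 < b1.1 then (i2, "Gemini") else b1
   let b3 := if i3 < b2.1 then (i3, "ChatGPT") else b2
   (if i4 < b3.1 then (i4, "Perplexity") else b3)).2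

lemma foldB_eval (ls : List String) :
    (bRules.foldl (fun best e =>
        let i := firstIdx e.1 ls
        if i < best.1 then (i, e.2) else best) (ls.length, "Manual")).2 =
    Gfun (firstIdx ["claude"] ls) (firstIdx ["gemini"] ls)
      (firstIdx ["openai", "gpt"] ls) (firstIdx ["perplexity"] ls) ls.length := by
  simp [bRules, List.foldl, Gfun]

lemma firstIdx_map_le (k : List String) (f : String → String) (ls : List String) :
    firstIdx k (ls.map f) ≤ ls.length := by
  induction ls with
  | nil => simp [firstIdx]
  | cons c rest ih =>
    simp only [List.map_cons, firstIdx, List.length_cons]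
    split <;> omega

lemma G_step (b1 b2 b3 b4 : Bool) (j1 j2 j3 j4 m : Nat)
    (h1 : j1 ≤ m) (h2 : j2 ≤ m) (h3 : j3 ≤ m) (h4 : j4 ≤ m) :
    Gfun (if b1 then 0 else j1 + 1) (if b2 then 0 else j2 + 1)
      (if b3 then 0 else j3 + 1) (if b4 then 0 else j4 + 1) (m + 1) =
    (if b1 then "Claude" else if b2 then "Gemini" else if b3 then "ChatGPT"
     else if b4 then "Perplexity" else Gfun j1 j2 j3 j4 m) := by
  cases b1 <;> cases b2 <;> cases b3 <;> cases b4 <;>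
    simp only [Gfun, if_true, if_false, Bool.false_eq_true] <;>
    split_ifs <;> first | rfl | omega

lemma loopG (cs : List String) :
    extractLoopA cs =
    Gfun (firstIdx ["claude"] (cs.map PySem.Str.lower))
      (firstIdx ["gemini"] (cs.map PySem.Str.lower))
      (firstIdx ["openai", "gpt"] (cs.map PySem.Str.lower))
      (firstIdx ["perplexity"] (cs.map PySem.Str.lower)) cs.length := by
  induction cs with
  | nil => rfl
  | cons c rest ih =>
    simp only [List.map_cons, List.length_cons, firstIdx,
      List.any_cons, List.any_nil, Bool.or_false]
    rw [G_step _ _ _ _ _ _ _ _ _ (firstIdx_map_le _ _ _) (firstIdx_map_le _ _ _)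
        (firstIdx_map_le _ _ _) (firstIdx_map_le _ _ _)]
    simp only [extractLoopA, ih]

-- ===== VERDICT (by name: the statement is the Claim_ definition above) =====
theorem extract_source_tool_spec : Claim_equal_extract_source_tool := by
  intro cs _
  unfold Spec_extract_source_tool extract_source_tool extract_source_tool_alt
  by_cases h : cs = []
  · subst h; rfl
  · simp only [if_neg h]
    rw [loopG]
    have := foldB_eval (cs.map PySem.Str.lower)
    simp only [List.length_map] at this ⊢
    exact this.symm
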